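-- pv_equiv track=rewrite | github.com/sistlasre/sistlasre.github.io | team_balancer.py | distribute_teams_cluster
-- ===== SOURCE A (Python) =====
-- from typing import List, Dict, Tuple, NamedTuple
--
-- def distribute_teams_cluster(players: List[Tuple[str, str, int]],
--                             num_teams: int,
--                             players_per_team: int) -> List[List[Tuple[str, str, int]]]:
--     """
--     Distribute players using cluster-based approach.
--
--     This strategy groups similar-strength players together first, then
--     distributes those groups among teams in a balanced manner.
--
--     Args:
--         players: List of (name, tier, score) tuples
--         num_teams: Number of teams to create
--         players_per_team: Number of players per team
--
--     Returns:
--         List of teams, where each team is a list of player tuples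
--     """
--     # Sort players by score
--     sorted_players = sorted(players, key=lambda x: x[2], reverse=True)
--
--     # Group players into clusters of size num_teams
--     clusters = [sorted_players[i:i+num_teams] for i in range(0, len(sorted_players), num_teams)]
--
--     # Initialize teams
--     teams = [[] for _ in range(num_teams)]
--
--     # Distribute clusters in alternating patterns
--     for i, cluster in enumerate(clusters):
--         if i % 2 == 0:  # Forward order
--             for j, player in enumerate(cluster):
--                 if j < len(teams):
--                     teams[j].append(player)
--         else:  # Reverse order
--             for j, player in enumerate(cluster):
--                 if j < len(teams):
--                     teams[len(teams) - 1 - j].append(player)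
--
--     # Validate team sizes
--     for team in teams:
--         if len(team) != players_per_team:
--             # This shouldn't happen with perfect division, but just in case
--             raise ValueError(f"Failed to distribute players evenly in cluster method. Team has {len(team)} players instead of {players_per_team}")
--
--     return teams
-- ===== SOURCE B (Python) =====
-- def distribute_teams_cluster(players, num_teams, players_per_team):
--     # Closed-form snake: build each team directly by indexing into the sorted
--     # list (team-major), instead of distributing player-by-player.
--     sorted_players = sorted(players, key=lambda x: x[2], reverse=True)
--     return [[sorted_players[row * num_teams + (idx if row % 2 == 0 else num_teams - 1 - idx)]
--              for row in range(players_per_team)]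
--             for idx in range(num_teams)]
-- ===== Notes on version B (the rewrite author's own statement) =====
-- stated objective: simpler
-- what changed: B replaces A's intermediate clusters list and player-by-player snake distribution with a closed-form team-major construction: each team is built directly by indexing the sorted list at row*num_teams + (idx or num_teams-1-idx by row parity).
import Mathlib
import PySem

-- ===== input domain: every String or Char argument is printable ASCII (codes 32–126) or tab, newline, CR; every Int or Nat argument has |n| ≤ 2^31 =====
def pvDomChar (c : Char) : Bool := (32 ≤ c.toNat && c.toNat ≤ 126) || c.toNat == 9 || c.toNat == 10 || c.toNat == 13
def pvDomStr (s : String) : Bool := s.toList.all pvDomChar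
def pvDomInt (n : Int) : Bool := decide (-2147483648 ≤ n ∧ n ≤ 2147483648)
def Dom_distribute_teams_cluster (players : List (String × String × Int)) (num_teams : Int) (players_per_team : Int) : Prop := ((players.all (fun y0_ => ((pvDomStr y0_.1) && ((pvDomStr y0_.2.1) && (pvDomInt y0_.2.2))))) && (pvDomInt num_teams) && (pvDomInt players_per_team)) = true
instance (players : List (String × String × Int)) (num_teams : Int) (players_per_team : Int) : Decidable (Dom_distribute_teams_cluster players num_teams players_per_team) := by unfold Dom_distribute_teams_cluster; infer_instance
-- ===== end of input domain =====

-- B builds each team directly by closed-form snake indexing into the sorted list (team-major),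
-- instead of A's intermediate clusters list distributed player-by-player; objective: simpler.

-- ===== PORT A =====
-- inner loop body, forward order: "if j < len(teams): teams[j].append(player)"
def pvAInnerFwd (teams : List (List (String × String × Int))) (jp : Int × (String × String × Int)) : List (List (String × String × Int)) :=
  if jp.1 < (teams.length : Int) then
    PySem.List.pySetD teams jp.1 (PySem.List.pyGetD teams jp.1 [] ++ [jp.2])
  else teams

-- inner loop body, reverse order: "if j < len(teams): teams[len(teams)-1-j].append(player)"
def pvAInnerRev (teams : List (List (String × String × Int))) (jp : Int × (String × String × Int)) : List (List (String × String × Int)) :=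
  if jp.1 < (teams.length : Int) then
    PySem.List.pySetD teams ((teams.length : Int) - 1 - jp.1)
      (PySem.List.pyGetD teams ((teams.length : Int) - 1 - jp.1) [] ++ [jp.2])
  else teams

-- body of "for i, cluster in enumerate(clusters): if i % 2 == 0: … else: …"
def pvAClusterStep (teams : List (List (String × String × Int))) (ic : Int × List (String × String × Int)) : List (List (String × String × Int)) :=
  if PySem.Int.mod ic.1 2 = 0 then (PySem.List.enumerate ic.2 0).foldl pvAInnerFwd teams
  else (PySem.List.enumerate ic.2 0).foldl pvAInnerRev teams

def distribute_teams_cluster (players : List (String × String × Int)) (num_teams : Int) (players_per_team : Int) : List (List (String × String × Int)) :=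
  let sorted_players := PySem.List.sorted players (fun x => x.2.2) true
  let clusters := (PySem.List.pyRange 0 (sorted_players.length : Int) num_teams).map
      (fun i => PySem.List.slice sorted_players (some i) (some (i + num_teams)))
  let teams : List (List (String × String × Int)) := (PySem.List.pyRange 0 num_teams 1).map (fun _ => [])
  (PySem.List.enumerate clusters 0).foldl pvAClusterStep teams
  -- Python's final validation loop only raises ValueError (a team size ≠ players_per_team);
  -- those inputs are excluded by Pre_, so the port returns teams.

-- ===== PORT B =====
-- "[[sorted_players[row*num_teams + (idx if row % 2 == 0 else num_teams-1-idx)]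
--    for row in range(players_per_team)] for idx in range(num_teams)]"
-- (pyGetD is exact here: inside Pre_ every index is in range; out-of-range raises are outside Pre_)
def distribute_teams_cluster_alt (players : List (String × String × Int)) (num_teams : Int) (players_per_team : Int) : List (List (String × String × Int)) :=
  let sorted_players := PySem.List.sorted players (fun x => x.2.2) true
  (PySem.List.pyRange 0 num_teams 1).map (fun idx =>
    (PySem.List.pyRange 0 players_per_team 1).map (fun row =>
      PySem.List.pyGetD sorted_players
        (row * num_teams + (if PySem.Int.mod row 2 = 0 then idx else num_teams - 1 - idx))
        ("", "", 0)))

-- ===== PRECONDITION & SPEC =====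
-- Pre_ is exactly where Python A returns: it excludes num_teams = 0 (A raises ValueError from
-- range(0, len, 0)) and positive num_teams with players.length ≠ num_teams * players_per_team
-- (A's final validation raises ValueError there); negative num_teams, where A returns [], is inside.
def Pre_distribute_teams_cluster (players : List (String × String × Int)) (num_teams : Int) (players_per_team : Int) : Prop :=
  num_teams < 0 ∨ (0 < num_teams ∧ (players.length : Int) = num_teams * players_per_team)
instance (players : List (String × String × Int)) (num_teams : Int) (players_per_team : Int) : Decidable (Pre_distribute_teams_cluster players num_teams players_per_team) := by unfold Pre_distribute_teams_cluster; infer_instance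

def pvWitness_distribute_teams_cluster : (List (String × String × Int)) × Int × Int :=
  ([("a", "x", 3), ("b", "y", 1)], 2, 1)

def Spec_distribute_teams_cluster (players : List (String × String × Int)) (num_teams : Int) (players_per_team : Int) (out : List (List (String × String × Int))) : Prop := out = distribute_teams_cluster_alt players num_teams players_per_team
instance (players : List (String × String × Int)) (num_teams : Int) (players_per_team : Int) (out : List (List (String × String × Int))) : Decidable (Spec_distribute_teams_cluster players num_teams players_per_team out) := by unfold Spec_distribute_teams_cluster; infer_instance

-- ===== CLAIM (what is proved, stated in full; the proofs are below) =====
def Claim_equal_distribute_teams_cluster : Prop := ∀ (players : List (String × String × Int)) (num_teams : Int) (players_per_team : Int), Dom_distribute_teams_cluster players num_teams players_per_team → Pre_distribute_teams_cluster players num_teams players_per_team → Spec_distribute_teams_cluster players num_teams players_per_team (distribute_teams_cluster players num_teams players_per_team)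

-- ===== LEMMAS AND PROOFS =====

-- chunks of size N (N > 0 in all uses), the mathematical shape of A's `clusters`
def pvChunks (N : Nat) : List (String × String × Int) → List (List (String × String × Int))
  | [] => []
  | x :: xs => (x :: xs.take (N - 1)) :: pvChunks N (xs.drop (N - 1))
  termination_by l => l.length
  decreasing_by simp

theorem pvChunks_nil (N : Nat) : pvChunks N [] = [] := by
  rw [pvChunks.eq_def]

theorem pvChunks_cons (N : Nat) (hN : 0 < N) (l : List (String × String × Int)) (hl : l ≠ []) :
    pvChunks N l = l.take N :: pvChunks N (l.drop N) := by
  obtain ⟨m, rfl⟩ : ∃ m, N = m + 1 := ⟨N - 1, by omega⟩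
  cases l with
  | nil => exact absurd rfl hl
  | cons x xs => rw [pvChunks.eq_def]; simp

theorem pvRange_pos_nil (a b s : Int) (hs : 0 < s) (h : b ≤ a) :
    PySem.List.pyRange a b s = [] := by
  rw [PySem.List.pyRange_of_pos a b hs]
  simp [not_lt.mpr h]

theorem pvRange_neg_nil (a b s : Int) (hs : s < 0) (h : a ≤ b) :
    PySem.List.pyRange a b s = [] := by
  simp only [PySem.List.pyRange, if_neg (by omega : ¬ s = 0)]
  rw [if_neg (by omega : ¬ 0 < s), if_neg (by omega : ¬ b < a)]
  rfl

theorem pvRange_pos_cons (a b s : Int) (hs : 0 < s) (h : a < b) :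
    PySem.List.pyRange a b s = a :: PySem.List.pyRange (a + s) b s := by
  rw [PySem.List.pyRange_of_pos a b hs, PySem.List.pyRange_of_pos (a + s) b hs]
  have hq : 0 ≤ (b - a - 1) / s := Int.ediv_nonneg (by omega) hs.le
  have hM : ((b - a + s - 1) / s).toNat = ((b - a - 1) / s).toNat + 1 := by
    have : b - a + s - 1 = (b - a - 1) + 1 * s := by ring
    rw [this, Int.add_mul_ediv_right _ _ (by omega : s ≠ 0)]
    omega
  have hM' : (if a + s < b then ((b - (a + s) + s - 1) / s).toNat else 0)
      = ((b - a - 1) / s).toNat := by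
    split
    · congr 1; ring_nf
    · have h2 : b - a - 1 < s := by omega
      rw [Int.ediv_eq_zero_of_lt (by omega) h2]
      rfl
  rw [if_pos h, hM, hM', List.range_succ_eq_map]
  simp only [List.map_cons, List.map_map]
  have hf : ((fun k : Nat => a + s * (k : Int)) ∘ Nat.succ) = fun k : Nat => a + s + s * (k : Int) := by
    funext k; simp only [Function.comp]; push_cast; ring
  rw [hf]
  simp

-- A's clusters expression is exactly chunking
theorem pvClusters_eq_chunks (N : Nat) (hN : 0 < N) (full : List (String × String × Int)) :
    ∀ (fuel k : Nat), full.length ≤ k + fuel →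
      ((PySem.List.pyRange (k : Int) (full.length : Int) (N : Int)).map
        (fun i => PySem.List.slice full (some i) (some (i + (N : Int)))))
      = pvChunks N (full.drop k) := by
  intro fuel
  induction fuel with
  | zero =>
      intro k hk
      rw [pvRange_pos_nil _ _ _ (by exact_mod_cast hN) (by exact_mod_cast hk),
        List.drop_eq_nil_of_le (by omega), pvChunks_nil]
      rfl
  | succ fuel ih =>
      intro k hk
      by_cases hlt : full.length ≤ k
      · rw [pvRange_pos_nil _ _ _ (by exact_mod_cast hN) (by exact_mod_cast hlt),
          List.drop_eq_nil_of_le hlt, pvChunks_nil]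
        rfl
      · rw [not_le] at hlt
        rw [pvRange_pos_cons _ _ _ (by exact_mod_cast hN) (by exact_mod_cast hlt)]
        simp only [List.map_cons]
        rw [PySem.List.slice_natCast_add full k N]
        have hcast : (k : Int) + (N : Int) = ((k + N : Nat) : Int) := by push_cast; ring
        rw [hcast, ih (k + N) (by omega)]
        rw [pvChunks_cons N hN (full.drop k) (by simp; omega), List.drop_drop]

-- the forward inner loop ignores the head team when all indices are ≥ 1
theorem pvShift : ∀ (c : List (String × String × Int)) (j : Nat)
    (t : List (String × String × Int)) (ts : List (List (String × String × Int))),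
    (PySem.List.enumerate c ((j : Int) + 1)).foldl pvAInnerFwd (t :: ts)
    = t :: (PySem.List.enumerate c (j : Int)).foldl pvAInnerFwd ts := by
  intro c
  induction c with
  | nil => intro j t ts; rfl
  | cons p c ihc =>
      intro j t ts
      rw [PySem.List.enumerate_cons, PySem.List.enumerate_cons]
      simp only [List.foldl_cons]
      have hstep : pvAInnerFwd (t :: ts) ((j : Int) + 1, p)
          = t :: pvAInnerFwd ts ((j : Int), p) := by
        simp only [pvAInnerFwd]
        by_cases hlt : j < ts.length
        · have h1 : ((j : Int) + 1) < ((t :: ts).length : Int) := by simp; omega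
          have h2 : ((j : Int)) < (ts.length : Int) := by exact_mod_cast hlt
          rw [if_pos h1, if_pos h2]
          have hc : ((j : Int) + 1) = (((j + 1 : Nat)) : Int) := by push_cast; ring
          rw [hc, PySem.List.pySetD_natCast, PySem.List.pySetD_natCast,
            PySem.List.pyGetD_natCast, PySem.List.pyGetD_natCast]
          simp
        · have h1 : ¬ ((j : Int) + 1) < ((t :: ts).length : Int) := by simp; omega
          have h2 : ¬ ((j : Int)) < (ts.length : Int) := by exact_mod_cast hlt
          rw [if_neg h1, if_neg h2]
      rw [hstep]
      have hc2 : ((j : Int) + 1) = (((j + 1 : Nat)) : Int) := by push_cast; ring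
      rw [hc2, ihc (j + 1) t _]

-- effect of the forward inner loop on a cluster that fits
theorem pvEffectFwdAux : ∀ (c : List (String × String × Int)) (teams : List (List (String × String × Int))),
    c.length ≤ teams.length →
    (PySem.List.enumerate c 0).foldl pvAInnerFwd teams
    = teams.zipWith (fun t x => t ++ [x]) c ++ teams.drop c.length := by
  intro c
  induction c with
  | nil => intro teams _; simp
  | cons p c ihc =>
      intro teams hle
      cases teams with
      | nil => simp at hle
      | cons t ts =>
          rw [PySem.List.enumerate_cons]
          simp only [List.foldl_cons]
          have hstep : pvAInnerFwd (t :: ts) ((0 : Int), p) = (t ++ [p]) :: ts := by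
            simp only [pvAInnerFwd]
            rw [if_pos (by simp)]
            have h0 : (0 : Int) = ((0 : Nat) : Int) := by norm_num
            rw [h0, PySem.List.pySetD_natCast, PySem.List.pyGetD_natCast]
            simp
          have h01 : (0 : Int) + 1 = ((0 : Nat) : Int) + 1 := by norm_num
          rw [hstep, h01, pvShift c 0 (t ++ [p]) ts]
          have h00 : ((0 : Nat) : Int) = (0 : Int) := by norm_num
          rw [h00, ihc ts (by simpa using hle)]
          simp

theorem pvEffectFwd (c : List (String × String × Int)) (teams : List (List (String × String × Int)))
    (h : c.length = teams.length) :
    (PySem.List.enumerate c 0).foldl pvAInnerFwd teams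
    = teams.zipWith (fun t x => t ++ [x]) c := by
  rw [pvEffectFwdAux c teams h.le, h, List.drop_length, List.append_nil]

-- a reverse set is a set in the reversed list
theorem pv_set_reverse (l : List (List (String × String × Int))) (n : Nat) (h : n < l.length)
    (a : List (String × String × Int)) :
    (l.reverse.set n a).reverse = l.set (l.length - 1 - n) a := by
  apply List.ext_getElem
  · simp
  · intro i h1 h2
    have hi : i < l.length := by simpa using h2
    simp only [List.getElem_reverse, List.length_set, List.length_reverse, List.getElem_set]
    split
    · split
      · rfl
      · omega
    · split
      · omega
      · congr 1
        omega

-- each reverse-order step is a forward-order step on the reversed team list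
theorem pvRevStep (teams : List (List (String × String × Int))) (n : Nat) (p : String × String × Int) :
    pvAInnerRev teams ((n : Int), p) = (pvAInnerFwd teams.reverse ((n : Int), p)).reverse := by
  simp only [pvAInnerRev, pvAInnerFwd, List.length_reverse]
  by_cases hlt : n < teams.length
  · have h1 : ((n : Int)) < (teams.length : Int) := by exact_mod_cast hlt
    rw [if_pos h1, if_pos h1]
    have hc : (teams.length : Int) - 1 - (n : Int) = ((teams.length - 1 - n : Nat) : Int) := by
      omega
    rw [hc, PySem.List.pySetD_natCast, PySem.List.pySetD_natCast,
      PySem.List.pyGetD_natCast, PySem.List.pyGetD_natCast,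
      List.getD_reverse n hlt, pv_set_reverse teams n hlt]
  · have h1 : ¬ ((n : Int)) < (teams.length : Int) := by exact_mod_cast hlt
    rw [if_neg h1, if_neg h1, List.reverse_reverse]

theorem pvRevRed : ∀ (c : List (String × String × Int)) (j : Nat) (teams : List (List (String × String × Int))),
    (PySem.List.enumerate c ((j : Int))).foldl pvAInnerRev teams
    = ((PySem.List.enumerate c ((j : Int))).foldl pvAInnerFwd teams.reverse).reverse := by
  intro c
  induction c with
  | nil => intro j teams; simp
  | cons p c ihc =>
      intro j teams
      rw [PySem.List.enumerate_cons]
      simp only [List.foldl_cons]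
      rw [pvRevStep teams j p]
      have hc : ((j : Int)) + 1 = (((j + 1 : Nat)) : Int) := by push_cast; ring
      rw [hc, ihc (j + 1) ((pvAInnerFwd teams.reverse ((j : Int), p)).reverse),
        List.reverse_reverse]

theorem pvEffectRev (c : List (String × String × Int)) (teams : List (List (String × String × Int)))
    (h : c.length = teams.length) :
    (PySem.List.enumerate c 0).foldl pvAInnerRev teams
    = (teams.reverse.zipWith (fun t x => t ++ [x]) c).reverse := by
  have h0 : (0 : Int) = ((0 : Nat) : Int) := by norm_num
  rw [h0, pvRevRed c 0 teams, ← h0, pvEffectFwd c teams.reverse (by simp [h])]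

-- the snake target of team I in row `row`
def pvIdx (N row I : Nat) : Nat := if row % 2 = 0 then I else N - 1 - I

-- folding A's cluster steps over the chunks from row r onwards completes the closed-form teams
theorem pvMain2 (N P : Nat) (hN : 0 < N) (full : List (String × String × Int))
    (d : String × String × Int) (hfull : full.length = N * P) :
    ∀ (fuel r : Nat), r ≤ P → P - r ≤ fuel →
      (PySem.List.enumerate (pvChunks N (full.drop (r * N))) ((r : Nat) : Int)).foldl pvAClusterStep
        ((List.range N).map (fun I => (List.range r).map (fun row => full.getD (row * N + pvIdx N row I) d)))
      = (List.range N).map (fun I => (List.range P).map (fun row => full.getD (row * N + pvIdx N row I) d)) := by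
  intro fuel
  induction fuel with
  | zero =>
      intro r hr hfuel
      obtain rfl : r = P := by omega
      rw [List.drop_eq_nil_of_le (by rw [hfull]; exact Nat.le_of_eq (Nat.mul_comm _ _)),
        pvChunks_nil]
      rfl
  | succ fuel ih =>
      intro r hr hfuel
      by_cases hrP : r = P
      · subst hrP
        rw [List.drop_eq_nil_of_le (by rw [hfull]; exact Nat.le_of_eq (Nat.mul_comm _ _)),
          pvChunks_nil]
        rfl
      · have hrlt : r < P := by omega
        have hcap : r * N + N ≤ N * P := by
          have := Nat.mul_le_mul_right N (by omega : r + 1 ≤ P)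
          calc r * N + N = (r + 1) * N := by ring
          _ ≤ P * N := this
          _ = N * P := Nat.mul_comm P N
        have hdlen : (full.drop (r * N)).length = N * P - r * N := by simp [hfull]
        have hne : full.drop (r * N) ≠ [] := by
          intro hcon
          have := congrArg List.length hcon
          rw [hdlen] at this
          simp at this
          omega
        rw [pvChunks_cons N hN _ hne, PySem.List.enumerate_cons, List.foldl_cons]
        have hclen : ((full.drop (r * N)).take N).length = N := by
          rw [List.length_take, hdlen]
          omega
        have htlen : (((List.range N).map (fun I => (List.range r).map
            (fun row => full.getD (row * N + pvIdx N row I) d)))).length = N := by simp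
        have hpar : PySem.Int.mod ((r : Nat) : Int) 2 = ((r % 2 : Nat) : Int) := by
          exact_mod_cast PySem.Int.mod_natCast r 2
        have hstep : pvAClusterStep
              ((List.range N).map (fun I => (List.range r).map (fun row => full.getD (row * N + pvIdx N row I) d)))
              (((r : Nat) : Int), (full.drop (r * N)).take N)
            = (List.range N).map (fun I => (List.range (r + 1)).map (fun row => full.getD (row * N + pvIdx N row I) d)) := by
          have hget : ∀ (I : Nat) (hI : I < N),
              ((full.drop (r * N)).take N)[I]'(by omega)
              = full.getD (r * N + I) d := by
            intro I hI
            rw [List.getElem_take, List.getElem_drop,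
              List.getD_eq_getElem full d (by omega)]
          unfold pvAClusterStep
          rw [hpar]
          by_cases hre : r % 2 = 0
          · rw [if_pos (by exact_mod_cast hre), pvEffectFwd _ _ (by rw [hclen, htlen])]
            apply List.ext_getElem
            · simp [hclen]
            · intro I h1 h2
              rw [List.getElem_zipWith]
              simp only [List.length_zipWith, htlen, hclen, Nat.min_self] at h1
              simp only [List.getElem_map, List.getElem_range, List.range_succ,
                List.map_append, List.map_cons, List.map_nil]
              rw [hget I h1]
              simp [pvIdx, hre]
          · rw [if_neg (by intro hcon; exact hre (by exact_mod_cast hcon)),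
              pvEffectRev _ _ (by rw [hclen, htlen])]
            apply List.ext_getElem
            · simp [hclen]
            · intro I h1 h2
              simp only [List.length_reverse, List.length_zipWith, List.length_map,
                List.length_range, List.length_reverse, Nat.min_self] at h1
              rw [List.getElem_reverse]
              simp only [List.length_zipWith, List.length_reverse, htlen, hclen, Nat.min_self]
              rw [List.getElem_zipWith]
              rw [List.getElem_reverse]
              simp only [htlen]
              simp only [List.getElem_map, List.getElem_range, List.range_succ,
                List.map_append, List.map_cons, List.map_nil]
              have hI : I < N := by
                simpa [htlen, hclen] using h1
              have hNI : N - 1 - (N - 1 - I) = I := by omega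
              rw [hNI, hget (N - 1 - I) (by omega)]
              simp [pvIdx, hre]
        rw [hstep, List.drop_drop]
        have hidx : r * N + N = (r + 1) * N := by ring
        have hc1 : ((r : Nat) : Int) + 1 = (((r + 1 : Nat)) : Int) := by push_cast; ring
        rw [hidx, hc1]
        exact ih (r + 1) (by omega) (by omega)

-- ===== VERDICT (by name: the statement is the Claim_ definition above) =====
theorem distribute_teams_cluster_spec : Claim_equal_distribute_teams_cluster := by
  intro players nt ppt _ hPre
  unfold Spec_distribute_teams_cluster distribute_teams_cluster distribute_teams_cluster_alt
  dsimp only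
  rcases hPre with hneg | ⟨hpos, hlen⟩
  · -- negative num_teams: both programs produce []
    have h1 : PySem.List.pyRange 0 nt 1 = [] := pvRange_pos_nil 0 nt 1 one_pos (by omega)
    have h2 : PySem.List.pyRange 0 ((PySem.List.sorted players (fun x => x.2.2) true).length : Int) nt = [] :=
      pvRange_neg_nil _ _ _ hneg (Int.natCast_nonneg _)
    rw [h1, h2]
    rfl
  · -- positive, evenly divisible case
    obtain ⟨N, rfl⟩ : ∃ N : Nat, nt = (N : Int) := ⟨nt.toNat, (Int.toNat_of_nonneg hpos.le).symm⟩
    have hN : 0 < N := by exact_mod_cast hpos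
    have hppt : 0 ≤ ppt := by
      by_contra hcon
      have hneg' : ppt < 0 := by omega
      have : (N : Int) * ppt < 0 := mul_neg_of_pos_of_neg hpos hneg'
      omega
    obtain ⟨P, rfl⟩ : ∃ P : Nat, ppt = (P : Int) := ⟨ppt.toNat, (Int.toNat_of_nonneg hppt).symm⟩
    have hfull : (PySem.List.sorted players (fun x => x.2.2) true).length = N * P := by
      have hs : ((PySem.List.sorted players (fun x => x.2.2) true).length : Int) = (N : Int) * (P : Int) := by
        rw [PySem.List.length_sorted]
        exact hlen
      exact_mod_cast hs
    have hcl := pvClusters_eq_chunks N hN (PySem.List.sorted players (fun x => x.2.2) true)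
      (PySem.List.sorted players (fun x => x.2.2) true).length 0 (by omega)
    simp only [Nat.cast_zero, List.drop_zero] at hcl
    rw [hcl]
    have hmain := pvMain2 N P hN (PySem.List.sorted players (fun x => x.2.2) true) ("", "", 0)
      hfull P 0 (Nat.zero_le _) (by omega)
    simp only [Nat.zero_mul, List.drop_zero, Nat.cast_zero, List.range_zero, List.map_nil] at hmain
    have ht0 : (PySem.List.pyRange 0 ((N : Nat) : Int) 1).map (fun _ => ([] : List (String × String × Int)))
        = (List.range N).map (fun _ => ([] : List (String × String × Int))) := by
      rw [PySem.List.pyRange_zero_natCast N, List.map_map]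
      rfl
    rw [ht0, hmain]
    -- now identify B's expression with the closed form
    rw [PySem.List.pyRange_zero_natCast N, List.map_map]
    apply List.map_congr_left
    intro I hI
    rw [List.mem_range] at hI
    simp only [Function.comp]
    rw [PySem.List.pyRange_zero_natCast P, List.map_map]
    apply List.map_congr_left
    intro row hrow
    rw [List.mem_range] at hrow
    simp only [Function.comp]
    have hparr : PySem.Int.mod ((row : Nat) : Int) 2 = ((row % 2 : Nat) : Int) := by
      exact_mod_cast PySem.Int.mod_natCast row 2
    rw [hparr]
    by_cases hre : row % 2 = 0
    · rw [if_pos (by exact_mod_cast hre)]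
      have hix : ((row * N + pvIdx N row I : Nat) : Int) = (row : Int) * (N : Int) + (I : Int) := by
        simp only [pvIdx, if_pos hre]; push_cast; ring
      rw [← hix, PySem.List.pyGetD_natCast]
    · rw [if_neg (by intro hcon; exact hre (by exact_mod_cast hcon))]
      have hix : ((row * N + pvIdx N row I : Nat) : Int) = (row : Int) * (N : Int) + ((N : Int) - 1 - (I : Int)) := by
        simp only [pvIdx, if_neg hre]
        have h1 : ((N - 1 - I : Nat) : Int) = (N : Int) - 1 - (I : Int) := by omega
        push_cast [← h1]
        ring
      rw [← hix, PySem.List.pyGetD_natCast]
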